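-- pv_equiv track=rewrite | github.com/doomsplayer/NextAction | nextaction.py | get_subitems
-- ===== SOURCE A (Python) =====
-- def get_subitems(items, parent_item=None):
--     """Search a flat item list for child items"""
--     result_items = []
--     found = False
--     if parent_item:
--         required_indent = parent_item['indent'] + 1
--     else:
--         required_indent = 1
--
--     for item in items:
--         if parent_item:
--             if not found and item['id'] != parent_item['id']:
--                 continue
--             else:
--                 found = True
--             if item['indent'] == parent_item['indent'] and item['id'] != parent_item['id']:
--                 return result_items
--             elif item['indent'] == required_indent and found:
--                 result_items.append(item)
--         elif item['indent'] == required_indent: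
--             result_items.append(item)
--     return result_items
-- ===== SOURCE B (Python) =====
-- def get_subitems(items, parent_item=None):
--     """Search a flat item list for child items"""
--     if not parent_item:
--         return [it for it in items if it['indent'] == 1]
--     pid = parent_item['id']
--     pind = parent_item['indent']
--     start = next((k for k, it in enumerate(items) if it['id'] == pid), None)
--     if start is None:
--         return []
--     tail = items[start:]
--     stop = len(tail)
--     for k, it in enumerate(tail):
--         if it['indent'] == pind and it['id'] != pid:
--             stop = k
--             break
--     return [it for it in tail[:stop] if it['indent'] == pind + 1]
-- ===== Notes on version B (the rewrite author's own statement) =====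
-- stated objective: idiomatic
-- what changed: Replaces A's single stateful scan with a 'found' flag and mid-loop early return by a three-phase decomposition: locate the parent's index, cut the tail at the first later sibling, and filter that slice for the child indent (falsy parent handled by a plain comprehension).
-- outside the precondition, e.g. on get_subitems([], {'indent': 3}): A returns [], B raises KeyError
import Mathlib
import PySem

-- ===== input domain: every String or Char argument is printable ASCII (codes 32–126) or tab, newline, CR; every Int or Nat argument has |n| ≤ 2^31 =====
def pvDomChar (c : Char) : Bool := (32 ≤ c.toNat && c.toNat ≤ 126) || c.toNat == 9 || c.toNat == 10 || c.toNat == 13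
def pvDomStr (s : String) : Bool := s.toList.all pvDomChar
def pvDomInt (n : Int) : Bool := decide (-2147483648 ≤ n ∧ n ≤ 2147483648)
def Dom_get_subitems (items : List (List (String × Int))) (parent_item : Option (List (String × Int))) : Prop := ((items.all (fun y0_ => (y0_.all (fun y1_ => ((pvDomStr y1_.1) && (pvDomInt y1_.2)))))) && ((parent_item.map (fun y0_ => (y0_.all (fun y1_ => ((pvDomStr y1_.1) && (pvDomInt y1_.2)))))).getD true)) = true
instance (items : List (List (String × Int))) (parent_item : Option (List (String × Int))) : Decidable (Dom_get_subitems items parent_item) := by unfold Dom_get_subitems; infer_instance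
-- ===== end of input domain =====

-- B replaces A's single stateful scan (found flag + early return) by a three-phase
-- locate / cut-at-first-sibling / filter decomposition; objective: idiomatic, same O(n) cost.
-- Dict access d[k] is first-match lookup on the association list; under Pre_ all keys exist,
-- the ports use default 0 where Python would raise KeyError (such inputs are outside Pre_).

-- ===== PORT A =====
-- A's loop: skip until the parent's id is found, then stop at a later same-indent
-- different-id item, appending items of the required indent along the way.
def pvLoopA (pid pind req : Int) (found : Bool) : List (List (String × Int)) → List (List (String × Int))
  | [] => []
  | item :: rest =>
    if !found && ((item.lookup "id").getD 0 != pid) then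
      pvLoopA pid pind req found rest
    else
      -- found = True from here on
      if ((item.lookup "indent").getD 0 == pind) && ((item.lookup "id").getD 0 != pid) then
        []  -- 'return result_items': the prefix built so far
      else if (item.lookup "indent").getD 0 == req then
        item :: pvLoopA pid pind req true rest
      else
        pvLoopA pid pind req true rest

-- the parent-is-falsy loop: append items whose indent equals required_indent = 1
def pvLoopA1 : List (List (String × Int)) → List (List (String × Int))
  | [] => []
  | item :: rest =>
    if (item.lookup "indent").getD 0 == 1 then item :: pvLoopA1 rest else pvLoopA1 rest

def get_subitems (items : List (List (String × Int))) (parent_item : Option (List (String × Int))) : List (List (String × Int)) :=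
  match parent_item with
  | some d =>
    if !d.isEmpty then
      pvLoopA ((d.lookup "id").getD 0) ((d.lookup "indent").getD 0) ((d.lookup "indent").getD 0 + 1) false items
    else pvLoopA1 items
  | none => pvLoopA1 items

-- ===== PORT B =====
def get_subitems_alt (items : List (List (String × Int))) (parent_item : Option (List (String × Int))) : List (List (String × Int)) :=
  match parent_item with
  | some d =>
    if !d.isEmpty then
      let pid := (d.lookup "id").getD 0
      let pind := (d.lookup "indent").getD 0
      match List.findIdx? (fun it => (it.lookup "id").getD 0 == pid) items with
      | none => []
      | some start =>
        let tail := items.drop start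
        let stop := (List.findIdx? (fun it => ((it.lookup "indent").getD 0 == pind) && ((it.lookup "id").getD 0 != pid)) tail).getD tail.length
        (tail.take stop).filter (fun it => (it.lookup "indent").getD 0 == pind + 1)
    else items.filter (fun it => (it.lookup "indent").getD 0 == 1)
  | none => items.filter (fun it => (it.lookup "indent").getD 0 == 1)

-- ===== PRECONDITION & SPEC =====
-- Pre_ excludes inputs on which Python A raises KeyError: every item must carry an
-- 'indent' key, and a truthy parent must carry 'id' and 'indent' and every item an 'id'.
-- This is slightly narrower than A's lazy access pattern: A can still return when keys are
-- missing only in items it skips or never reaches (see cites); B behaves the same there.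
def Pre_get_subitems (items : List (List (String × Int))) (parent_item : Option (List (String × Int))) : Prop :=
  (∀ it ∈ items, (it.lookup "indent").isSome = true) ∧
  ((parent_item.elim false (fun d => !d.isEmpty)) = true →
    ((parent_item.getD []).lookup "id").isSome = true ∧
    ((parent_item.getD []).lookup "indent").isSome = true ∧
    ∀ it ∈ items, (it.lookup "id").isSome = true)
instance (items : List (List (String × Int))) (parent_item : Option (List (String × Int))) : Decidable (Pre_get_subitems items parent_item) := by unfold Pre_get_subitems; infer_instance

def pvWitness_get_subitems : (List (List (String × Int))) × (Option (List (String × Int))) :=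
  ([[("id", 1), ("indent", 1)], [("id", 2), ("indent", 2)], [("id", 3), ("indent", 1)]],
   some [("id", 1), ("indent", 1)])

def Spec_get_subitems (items : List (List (String × Int))) (parent_item : Option (List (String × Int))) (out : List (List (String × Int))) : Prop := out = get_subitems_alt items parent_item
instance (items : List (List (String × Int))) (parent_item : Option (List (String × Int))) (out : List (List (String × Int))) : Decidable (Spec_get_subitems items parent_item out) := by unfold Spec_get_subitems; infer_instance

-- ===== CLAIM (what is proved, stated in full; the proofs are below) =====
def Claim_equal_get_subitems : Prop := ∀ (items : List (List (String × Int))) (parent_item : Option (List (String × Int))), Dom_get_subitems items parent_item → Pre_get_subitems items parent_item → Spec_get_subitems items parent_item (get_subitems items parent_item)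

-- ===== LEMMAS AND PROOFS =====

-- the falsy-parent loop is a filter
theorem pvLoopA1_eq_filter (l : List (List (String × Int))) :
    pvLoopA1 l = l.filter (fun it => (it.lookup "indent").getD 0 == 1) := by
  induction l with
  | nil => rfl
  | cons it rest ih =>
    by_cases h : ((it.lookup "indent").getD 0 == 1) = true
    · simp [pvLoopA1, h, ih]
    · simp [pvLoopA1, h, ih]

-- the found phase: take up to the first stopping item, then filter on the child indent
theorem pvLoopA_true_eq (pid pind : Int) (l : List (List (String × Int))) :
    pvLoopA pid pind (pind + 1) true l =
      (l.take ((List.findIdx? (fun it => ((it.lookup "indent").getD 0 == pind) && ((it.lookup "id").getD 0 != pid)) l).getD l.length)).filter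
        (fun it => (it.lookup "indent").getD 0 == pind + 1) := by
  induction l with
  | nil => rfl
  | cons it rest ih =>
    simp only [pvLoopA, List.findIdx?_cons]
    by_cases hstop : (((it.lookup "indent").getD 0 == pind) && ((it.lookup "id").getD 0 != pid)) = true
    · simp [hstop]
    · simp only [hstop, Bool.false_eq_true, if_false]
      have htail : (Option.getD (Option.map (· + 1) (List.findIdx? (fun it => ((it.lookup "indent").getD 0 == pind) && ((it.lookup "id").getD 0 != pid)) rest)) (rest.length + 1))
          = (Option.getD (List.findIdx? (fun it => ((it.lookup "indent").getD 0 == pind) && ((it.lookup "id").getD 0 != pid)) rest) rest.length) + 1 := by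
        cases List.findIdx? (fun it => ((it.lookup "indent").getD 0 == pind) && ((it.lookup "id").getD 0 != pid)) rest <;> rfl
      simp only [List.length_cons, htail, List.take_succ_cons, List.filter_cons]
      by_cases hch : ((it.lookup "indent").getD 0 == pind + 1) = true
      · simp [hch, ih]
      · simp [hch, ih]

-- once the head matches the parent's id, found-false behaves as found-true
theorem pvLoopA_found_head (pid pind req : Int) (it : List (String × Int)) (rest : List (List (String × Int)))
    (h : ((it.lookup "id").getD 0 == pid) = true) :
    pvLoopA pid pind req false (it :: rest) = pvLoopA pid pind req true (it :: rest) := by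
  simp only [pvLoopA]
  have : ((it.lookup "id").getD 0 != pid) = false := by simp_all [bne]
  simp [this]

-- the search phase: A's found-false loop equals B's locate-then-scan
theorem pvLoopA_false_eq (pid pind : Int) (l : List (List (String × Int))) :
    pvLoopA pid pind (pind + 1) false l =
      (match List.findIdx? (fun it => (it.lookup "id").getD 0 == pid) l with
       | none => []
       | some s => pvLoopA pid pind (pind + 1) true (l.drop s)) := by
  induction l with
  | nil => rfl
  | cons it rest ih =>
    by_cases hm : ((it.lookup "id").getD 0 == pid) = true
    · rw [pvLoopA_found_head pid pind (pind + 1) it rest hm]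
      simp [List.findIdx?_cons, hm]
    · have hne : ((it.lookup "id").getD 0 != pid) = true := by simp_all [bne]
      have hskip : pvLoopA pid pind (pind + 1) false (it :: rest) = pvLoopA pid pind (pind + 1) false rest := by
        simp [pvLoopA, hne]
      rw [hskip, ih]
      simp only [List.findIdx?_cons, hm, Bool.false_eq_true, if_false]
      cases List.findIdx? (fun it => (it.lookup "id").getD 0 == pid) rest <;> simp

-- ===== VERDICT (by name: the statement is the Claim_ definition above) =====
theorem get_subitems_spec : Claim_equal_get_subitems := by
  intro items parent_item _hdom _hpre
  unfold Spec_get_subitems get_subitems get_subitems_alt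
  cases parent_item with
  | none => simp [pvLoopA1_eq_filter]
  | some d =>
    by_cases hd : d.isEmpty
    · simp [hd, pvLoopA1_eq_filter]
    · simp only [hd, Bool.not_false, if_pos]
      rw [pvLoopA_false_eq]
      cases hfi : List.findIdx? (fun it => (it.lookup "id").getD 0 == (d.lookup "id").getD 0) items with
      | none => simp
      | some s => simp [pvLoopA_true_eq]
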